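-- pv_equiv track=rewrite | github.com/sachinlv/BlogXtractor | domainanalysis.py | extract_first_and_last_tags
-- ===== SOURCE A (Python) =====
-- def extract_first_and_last_tags(path_lists):
--     tag_pairs = {}
--
--     for path_list in path_lists:
--         for path in path_list:
--             path_split = path.split('/')
--             first_tags = ''
--             last_tags = ''
--             tmp = []
--             for tag in path_split:
--                 if '[' in tag:
--                     t = tag[:tag.index('[')]
--                     tmp.append(t)
--                 else:
--                     tmp.append(tag)
--             path_split = tmp
--
--             if len(path_split) > 4:
--                 first_tags = path_split[0] + '/' + path_split[1]
--                 last_tags = path_split[len(path_split) - 2] + '/' + path_split[len(path_split) - 1]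
--             #TODO:If pathsplit less than 4 ???
--             #TODO:If start tags are /html/body then make changes to code in extraction.py to handle this
--             #creating a dictionary with keys as first_tags and values as list of last tags for corresponding first tag
--             # the list of last tags contains unique list of tags
--             if first_tags in tag_pairs.keys():
--                 if last_tags not in tag_pairs[first_tags]:
--                     tag_pairs[first_tags].append(last_tags) #TODO:eleminated duplicates
--             else:
--                 tag_pairs[first_tags] = []
--                 tag_pairs[first_tags].append(last_tags)
--
--     return tag_pairs
-- ===== SOURCE B (Python) =====
-- def _path_pair(path):
--     tags = [tag[:tag.index('[')] if '[' in tag else tag for tag in path.split('/')]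
--     if len(tags) > 4:
--         return tags[0] + '/' + tags[1], tags[-2] + '/' + tags[-1]
--     return '', ''
--
--
-- def extract_first_and_last_tags(path_lists):
--     pairs = [_path_pair(path) for path_list in path_lists for path in path_list]
--     firsts = list(dict.fromkeys(f for f, _ in pairs))
--     return {f: list(dict.fromkeys(l for g, l in pairs if g == f)) for f in firsts}
-- ===== Notes on version B (the rewrite author's own statement) =====
-- stated objective: alternative
-- what changed: A builds the dict incrementally, deduplicating by membership test at each insertion; B first materializes the flat list of (first,last) pairs via a per-path helper, then builds the result non-incrementally: for each distinct first key (dict.fromkeys order) it gathers that key's last tags by a filter over the whole pair list and deduplicates them with dict.fromkeys.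
import Mathlib
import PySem

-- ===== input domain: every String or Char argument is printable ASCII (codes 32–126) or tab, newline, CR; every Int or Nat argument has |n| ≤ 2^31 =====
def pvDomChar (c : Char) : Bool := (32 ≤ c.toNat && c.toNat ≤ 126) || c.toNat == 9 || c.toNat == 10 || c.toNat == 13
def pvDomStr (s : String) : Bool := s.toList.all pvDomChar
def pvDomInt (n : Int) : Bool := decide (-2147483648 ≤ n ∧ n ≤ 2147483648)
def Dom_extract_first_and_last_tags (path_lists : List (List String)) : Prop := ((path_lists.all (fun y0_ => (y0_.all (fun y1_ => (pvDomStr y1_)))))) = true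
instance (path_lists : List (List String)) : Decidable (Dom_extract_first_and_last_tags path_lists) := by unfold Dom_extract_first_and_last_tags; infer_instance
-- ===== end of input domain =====

-- B replaces A's incremental dict-of-lists accumulation with a non-incremental build:
-- flatten all (first,last) pairs first, then for each distinct first key gather and
-- dedup its last tags by a filter over the pair list (objective: alternative).

-- ===== PORT A =====
def extract_first_and_last_tags (path_lists : List (List String)) : List (String × List String) :=
  (path_lists.foldl (fun tag_pairs path_list =>
    path_list.foldl (fun tag_pairs path =>
      let path_split := (PySem.Str.split? path "/").getD []
      let tmp := path_split.foldl (fun tmp tag =>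
        if PySem.Str.isIn "[" tag then
          tmp ++ [PySem.Str.slice tag none (some (PySem.Str.find tag "["))]
        else
          tmp ++ [tag]) []
      let path_split := tmp
      let fl :=
        if path_split.length > 4 then
          (PySem.List.pyGetD path_split 0 "" ++ "/" ++ PySem.List.pyGetD path_split 1 "",
           PySem.List.pyGetD path_split ((path_split.length : Int) - 2) "" ++ "/" ++
             PySem.List.pyGetD path_split ((path_split.length : Int) - 1) "")
        else ("", "")
      let first_tags := fl.1
      let last_tags := fl.2
      if tag_pairs.contains first_tags then
        if last_tags ∈ tag_pairs.getD first_tags [] then tag_pairs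
        else tag_pairs.insert first_tags (tag_pairs.getD first_tags [] ++ [last_tags])
      else
        let tag_pairs := tag_pairs.insert first_tags ([] : List String)
        tag_pairs.insert first_tags (tag_pairs.getD first_tags [] ++ [last_tags]))
      tag_pairs) PySem.Dict.empty).items

-- ===== PORT B =====
def pvPathPair (path : String) : String × String :=
  let tags := ((PySem.Str.split? path "/").getD []).map (fun tag =>
    if PySem.Str.isIn "[" tag then PySem.Str.slice tag none (some (PySem.Str.find tag "[")) else tag)
  if tags.length > 4 then
    (PySem.List.pyGetD tags 0 "" ++ "/" ++ PySem.List.pyGetD tags 1 "",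
     PySem.List.pyGetD tags (-2) "" ++ "/" ++ PySem.List.pyGetD tags (-1) "")
  else ("", "")

def extract_first_and_last_tags_alt (path_lists : List (List String)) : List (String × List String) :=
  let pairs := (path_lists.flatMap (fun path_list => path_list)).map pvPathPair
  let firsts := PySem.List.dedup (pairs.map (·.1))
  firsts.map (fun f => (f, PySem.List.dedup ((pairs.filter (fun p => p.1 == f)).map (·.2))))

-- ===== PRECONDITION & SPEC =====
def Spec_extract_first_and_last_tags (path_lists : List (List String)) (out : List (String × List String)) : Prop := out = extract_first_and_last_tags_alt path_lists
instance (path_lists : List (List String)) (out : List (String × List String)) : Decidable (Spec_extract_first_and_last_tags path_lists out) := by unfold Spec_extract_first_and_last_tags; infer_instance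

-- ===== CLAIM (what is proved, stated in full; the proofs are below) =====
def Claim_equal_extract_first_and_last_tags : Prop := ∀ (path_lists : List (List String)), Dom_extract_first_and_last_tags path_lists → Spec_extract_first_and_last_tags path_lists (extract_first_and_last_tags path_lists)

-- ===== LEMMAS AND PROOFS =====

-- A's per-pair grouping step, named so the fold can be reasoned about
def pvStepA (d : PySem.Dict String (List String)) (p : String × String) : PySem.Dict String (List String) :=
  if d.contains p.1 then
    if p.2 ∈ d.getD p.1 [] then d
    else d.insert p.1 (d.getD p.1 [] ++ [p.2])
  else
    let d1 := d.insert p.1 ([] : List String)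
    d1.insert p.1 (d1.getD p.1 [] ++ [p.2])

-- the negative indices -2/-1 of B's helper agree with A's length-based indices
lemma pvGetD_len_sub_two (tags : List String) (h : tags.length > 4) :
    PySem.List.pyGetD tags ((tags.length : Int) - 2) "" = PySem.List.pyGetD tags (-2) "" := by
  rw [PySem.List.pyGetD_neg_ofNat tags 2 "" (by omega) (by omega),
      PySem.List.pyGetD_eq_getElem tags "" (by omega) (by omega)]
  congr 1
  omega

lemma pvGetD_len_sub_one (tags : List String) (h : tags.length > 4) :
    PySem.List.pyGetD tags ((tags.length : Int) - 1) "" = PySem.List.pyGetD tags (-1) "" := by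
  rw [PySem.List.pyGetD_neg_ofNat tags 1 "" (by omega) (by omega),
      PySem.List.pyGetD_eq_getElem tags "" (by omega) (by omega)]
  congr 1
  omega

-- A's per-path pair (tmp-building loop + explicit length-based indices) equals B's helper
lemma pvPair_eq (path : String) {T : List String}
    (hT : ((PySem.Str.split? path "/").getD []).foldl (fun tmp tag =>
      if PySem.Str.isIn "[" tag then
        tmp ++ [PySem.Str.slice tag none (some (PySem.Str.find tag "["))]
      else
        tmp ++ [tag]) [] = T) :
    (if T.length > 4 then
       (PySem.List.pyGetD T 0 "" ++ "/" ++ PySem.List.pyGetD T 1 "",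
        PySem.List.pyGetD T ((T.length : Int) - 2) "" ++ "/" ++
          PySem.List.pyGetD T ((T.length : Int) - 1) "")
     else ("", "")) = pvPathPair path := by
  subst hT
  simp only [pvPathPair]
  have hfe : (fun (tmp : List String) tag =>
      if PySem.Str.isIn "[" tag then
        tmp ++ [PySem.Str.slice tag none (some (PySem.Str.find tag "["))]
      else
        tmp ++ [tag]) = fun (tmp : List String) tag =>
      tmp ++ [if PySem.Str.isIn "[" tag then PySem.Str.slice tag none (some (PySem.Str.find tag "[")) else tag] := by
    funext tmp tag; split <;> rfl
  rw [hfe]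
  rw [show ((PySem.Str.split? path "/").getD []).foldl (fun (tmp : List String) tag =>
      tmp ++ [if PySem.Str.isIn "[" tag then PySem.Str.slice tag none (some (PySem.Str.find tag "[")) else tag]) [] =
      ((PySem.Str.split? path "/").getD []).map (fun tag =>
        if PySem.Str.isIn "[" tag then PySem.Str.slice tag none (some (PySem.Str.find tag "[")) else tag) by
    simpa using PySem.List.foldl_append_singleton_eq_map
      (l := (PySem.Str.split? path "/").getD [])
      (f := fun tag => if PySem.Str.isIn "[" tag then PySem.Str.slice tag none (some (PySem.Str.find tag "[")) else tag)
      (acc := [])]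
  set tags := ((PySem.Str.split? path "/").getD []).map (fun tag =>
    if PySem.Str.isIn "[" tag then PySem.Str.slice tag none (some (PySem.Str.find tag "[")) else tag) with htags
  by_cases h : tags.length > 4
  · simp only [h, if_true, pvGetD_len_sub_two tags h, pvGetD_len_sub_one tags h]
  · simp only [h, if_false]

-- one grouping step adds the key and set-adds the last tag to its bucket
lemma pvStepA_keys (d : PySem.Dict String (List String)) (p : String × String) :
    (pvStepA d p).keys = PySem.Set.add d.keys p.1 := by
  unfold pvStepA
  by_cases h : d.contains p.1 = true
  · have hm : p.1 ∈ d.keys := (PySem.Dict.contains_iff_mem_keys _ _).mp h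
    rw [PySem.Set.add_of_mem hm]
    simp only [h, if_true]
    split
    · rfl
    · exact PySem.Dict.keys_insert_of_contains _ _ h
  · have hm : p.1 ∉ d.keys := fun hmem => h ((PySem.Dict.contains_iff_mem_keys _ _).mpr hmem)
    have h' : d.contains p.1 = false := by simpa using h
    rw [PySem.Set.add_of_not_mem hm]
    simp only [h', Bool.false_eq_true, if_false]
    rw [PySem.Dict.insert_insert_self,
        PySem.Dict.keys_insert_of_not_contains _ _ h']

lemma pvStepA_getD (d : PySem.Dict String (List String)) (p : String × String) (f : String) :
    (pvStepA d p).getD f [] =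
      if p.1 = f then PySem.Set.add (d.getD f []) p.2 else d.getD f [] := by
  unfold pvStepA
  by_cases h : d.contains p.1 = true
  · simp only [h, if_true]
    by_cases hm : p.2 ∈ d.getD p.1 []
    · simp only [hm, if_true]
      by_cases hf : p.1 = f
      · subst hf; rw [PySem.Set.add_of_mem hm]; simp
      · simp [hf]
    · simp only [hm, if_false]
      rw [PySem.Dict.getD_insert]
      by_cases hf : p.1 = f
      · subst hf; simp [PySem.Set.add_of_not_mem hm]
      · have hf' : ¬ f = p.1 := fun hh => hf hh.symm
        simp [hf, hf']
  · have h' : d.contains p.1 = false := by simpa using h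
    simp only [h', Bool.false_eq_true, if_false]
    rw [PySem.Dict.insert_insert_self, PySem.Dict.getD_insert]
    have hd : d.getD p.1 [] = [] := PySem.Dict.getD_of_not_contains _ _ h'
    by_cases hf : p.1 = f
    · subst hf
      simp [hd]
    · have hf' : ¬ f = p.1 := fun hh => hf hh.symm
      simp [hf, hf']

-- folding A's step over the flat pair list: keys are the set of first tags …
lemma pvFoldA_keys (l : List (String × String)) (d : PySem.Dict String (List String)) :
    (l.foldl pvStepA d).keys = PySem.Set.update d.keys (l.map (·.1)) := by
  induction l generalizing d with
  | nil => simp [PySem.Set.update]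
  | cons p t ih =>
    simp only [List.foldl_cons, List.map_cons, PySem.Set.update_cons]
    rw [ih, pvStepA_keys]

-- … and each bucket is the set of that key's last tags, in first-seen order
lemma pvFoldA_getD (l : List (String × String)) (d : PySem.Dict String (List String)) (f : String) :
    (l.foldl pvStepA d).getD f [] =
      PySem.Set.update (d.getD f []) ((l.filter (fun p => p.1 == f)).map (·.2)) := by
  induction l generalizing d with
  | nil => simp [PySem.Set.update]
  | cons p t ih =>
    simp only [List.foldl_cons, List.filter_cons]
    by_cases hf : p.1 = f
    · simp only [hf, beq_self_eq_true, if_true, List.map_cons, PySem.Set.update_cons]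
      rw [ih, pvStepA_getD]
      simp [hf]
    · have : (p.1 == f) = false := by simpa using hf
      simp only [this, Bool.false_eq_true, if_false]
      rw [ih, pvStepA_getD]
      simp [hf]

-- fold over the flattened list = the nested fold (bridges B's one flat pass to A's two loops)
lemma pvFoldl_flatMap {α β : Type} (f : β → α → β) (l : List (List α)) (init : β) :
    (l.flatMap (fun x => x)).foldl f init = l.foldl (fun acc q => q.foldl f acc) init := by
  induction l generalizing init with
  | nil => rfl
  | cons h t ih => simp only [List.flatMap_cons, List.foldl_append, List.foldl_cons]; exact ih _

-- ===== VERDICT (by name: the statement is the Claim_ definition above) =====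
theorem extract_first_and_last_tags_spec : Claim_equal_extract_first_and_last_tags := by
  intro path_lists _
  unfold Spec_extract_first_and_last_tags
  -- A is the fold of pvStepA over the flat pair list
  have hA : extract_first_and_last_tags path_lists =
      (((path_lists.flatMap (fun path_list => path_list)).map pvPathPair).foldl pvStepA
        PySem.Dict.empty).items := by
    simp only [extract_first_and_last_tags]
    rw [List.foldl_map, pvFoldl_flatMap]
    congr 1
    refine List.foldl_ext _ _ _ (fun d q hq => ?_)
    refine List.foldl_ext _ _ _ (fun d' path hp => ?_)
    rw [pvPair_eq path rfl]
    rfl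
  rw [hA]
  set pairs := (path_lists.flatMap (fun path_list => path_list)).map pvPathPair with hpairs
  have hkeys : ((pairs.foldl pvStepA PySem.Dict.empty)).keys =
      PySem.Set.ofList (pairs.map (·.1)) := by
    rw [pvFoldA_keys]
    simp [PySem.Dict.keys_empty, PySem.Set.update_nil_left]
  have hnd : ((pairs.foldl pvStepA PySem.Dict.empty)).keys.Nodup := by
    rw [hkeys]; exact PySem.Set.nodup_ofList _
  rw [PySem.Dict.items_eq_map_keys _ hnd ([] : List String), hkeys]
  simp only [extract_first_and_last_tags_alt, ← hpairs]
  rw [PySem.List.dedup_eq_ofList]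
  refine List.map_congr_left (fun f hf => ?_)
  rw [pvFoldA_getD]
  simp [PySem.Dict.getD_empty, PySem.Set.update_nil_left, PySem.List.dedup_eq_ofList]
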